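-- pv_equiv track=rewrite | github.com/real-link-tech/reallink-skills | skills/memreport-analyze/scripts/parse_memreport.py | find_last_snapshot_start
-- ===== SOURCE A (Python) =====
-- def find_last_snapshot_start(lines):
--     """Find the start of the last snapshot in multi-snapshot memreports.
--
--     Memreports with multiple snapshots repeat the header pattern.
--     Returns the line index where the last snapshot begins, or 0 if single snapshot.
--     """
--     snapshot_starts = []
--     for i, line in enumerate(lines):
--         # Snapshot boundaries are indicated by repeated header patterns
--         if line.startswith("Changelist:") and i > 0:
--             snapshot_starts.append(i)
--     if len(snapshot_starts) > 1:
--         return snapshot_starts[-1]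
--     return 0
-- ===== SOURCE B (Python) =====
-- def find_last_snapshot_start(lines):
--     """Find the start of the last snapshot in multi-snapshot memreports.
--
--     Scan backward for the last header line (index > 0); it is the start of the
--     last snapshot only if an earlier line (index > 0) is also a header.
--     """
--     for L in range(len(lines) - 1, 0, -1):
--         if lines[L].startswith("Changelist:"):
--             if any(lines[j].startswith("Changelist:") for j in range(1, L)):
--                 return L
--             return 0
--     return 0
-- ===== Notes on version B (the rewrite author's own statement) =====
-- stated objective: alternative
-- what changed: Replaces the forward pass that accumulates all matching indices in a list with a backward locate scan that returns at the first (= last) header found, plus a bounded forward multiplicity check; no list is built.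
import Mathlib
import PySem

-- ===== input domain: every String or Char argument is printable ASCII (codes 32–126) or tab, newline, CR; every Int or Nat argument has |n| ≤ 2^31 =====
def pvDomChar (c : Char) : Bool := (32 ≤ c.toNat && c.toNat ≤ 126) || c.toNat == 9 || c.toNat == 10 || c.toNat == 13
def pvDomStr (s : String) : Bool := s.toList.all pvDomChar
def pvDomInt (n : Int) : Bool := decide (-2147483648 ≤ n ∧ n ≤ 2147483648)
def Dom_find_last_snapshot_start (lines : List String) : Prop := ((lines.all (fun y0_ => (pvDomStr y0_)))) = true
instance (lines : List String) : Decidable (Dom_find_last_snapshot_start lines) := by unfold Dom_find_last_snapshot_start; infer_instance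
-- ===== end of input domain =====

-- B replaces A's forward collect-all-matches list with a backward locate scan plus a bounded
-- earlier-match check (alternative decomposition, same cost, no list built).

-- ===== PORT A =====
def find_last_snapshot_start (lines : List String) : Int :=
  let snapshot_starts : List Int :=
    (PySem.List.enumerate lines 0).foldl
      (fun acc p =>
        if PySem.Str.startswith p.2 "Changelist:" && decide (0 < p.1) then acc ++ [p.1] else acc)
      []
  if 1 < snapshot_starts.length then
    -- snapshot_starts[-1]; under the guard the list is nonempty, so Python never raises here
    (PySem.List.pyGet? snapshot_starts (-1)).getD 0
  else 0

-- ===== PORT B =====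
-- Source B's 'for L in range(len(lines)-1, 0, -1)' with its early returns, as a countdown recursion:
-- pvScanB lines n runs the loop body for L = n, n-1, …, 1.  lines.getD L "" is lines[L]
-- (L is always in range when the body runs, so the default is never used).
def pvScanB (lines : List String) : Nat → Int
  | 0 => 0
  | L + 1 =>
    if PySem.Str.startswith (lines.getD (L + 1) "") "Changelist:" then
      if (PySem.List.pyRange 1 ((L : Int) + 1) 1).any
          (fun j => PySem.Str.startswith (lines.getD j.toNat "") "Changelist:") then
        ((L : Int) + 1)
      else 0
    else pvScanB lines L

def find_last_snapshot_start_alt (lines : List String) : Int :=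
  pvScanB lines (lines.length - 1)

-- ===== PRECONDITION & SPEC =====
def Spec_find_last_snapshot_start (lines : List String) (out : Int) : Prop := out = find_last_snapshot_start_alt lines
instance (lines : List String) (out : Int) : Decidable (Spec_find_last_snapshot_start lines out) := by unfold Spec_find_last_snapshot_start; infer_instance

-- ===== CLAIM (what is proved, stated in full; the proofs are below) =====
def Claim_equal_find_last_snapshot_start : Prop := ∀ (lines : List String), Dom_find_last_snapshot_start lines → Spec_find_last_snapshot_start lines (find_last_snapshot_start lines)

-- ===== LEMMAS AND PROOFS =====

-- header test at index j
def pvPred (lines : List String) (j : Nat) : Bool :=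
  PySem.Str.startswith (lines.getD j "") "Changelist:"

-- the header indexes among 1..n
def pvFil (lines : List String) (n : Nat) : List Nat :=
  (List.range (n + 1)).filter (fun j => decide (0 < j) && pvPred lines j)

lemma pvScanB_eq (lines : List String) (n : Nat) :
    pvScanB lines n =
      if 2 ≤ (pvFil lines n).length then (((pvFil lines n).getLastD 0 : Nat) : Int) else 0 := by
  induction n with
  | zero =>
    simp [pvScanB, pvFil, List.range_succ, List.filter]
  | succ L ih =>
    have hfil : pvFil lines (L + 1) =
        pvFil lines L ++ (if pvPred lines (L + 1) then [L + 1] else []) := by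
      simp only [pvFil, List.range_succ, List.filter_append]
      congr 1
      by_cases hp : pvPred lines (L + 1) <;> simp [List.filter, hp]
    have hany : ((PySem.List.pyRange 1 ((L : Int) + 1) 1).any
        (fun j => PySem.Str.startswith (lines.getD j.toNat "") "Changelist:") = true)
        ↔ pvFil lines L ≠ [] := by
      rw [List.any_eq_true]
      constructor
      · rintro ⟨j, hmem, hj⟩
        rw [PySem.List.mem_pyRange_one] at hmem
        intro hnil
        unfold pvFil at hnil
        rw [List.filter_eq_nil_iff] at hnil
        refine hnil j.toNat ?_ ?_
        · rw [List.mem_range]; omega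
        · simp only [Bool.and_eq_true, decide_eq_true_eq]
          exact ⟨by omega, hj⟩
      · intro hne
        obtain ⟨k, hk⟩ := List.exists_mem_of_ne_nil _ hne
        have hk' := hk
        rw [pvFil, List.mem_filter, List.mem_range] at hk'
        obtain ⟨hkr, hkc⟩ := hk'
        simp only [Bool.and_eq_true, decide_eq_true_eq] at hkc
        refine ⟨(k : Int), ?_, ?_⟩
        · rw [PySem.List.mem_pyRange_one]
          constructor <;> [exact_mod_cast hkc.1; exact_mod_cast (by omega : k < L + 1)]
        · simpa [pvPred] using hkc.2
    by_cases hp : pvPred lines (L + 1)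
    · have hp' : PySem.Str.startswith (lines.getD (L + 1) "") "Changelist:" = true := hp
      by_cases hne : pvFil lines L = []
      · have : ¬ ((PySem.List.pyRange 1 ((L : Int) + 1) 1).any
            (fun j => PySem.Str.startswith (lines.getD j.toNat "") "Changelist:") = true) := by
          rw [hany]; simp [hne]
        simp only [pvScanB, hp', if_true, this, hfil, hp, hne]
        simp
      · have : ((PySem.List.pyRange 1 ((L : Int) + 1) 1).any
            (fun j => PySem.Str.startswith (lines.getD j.toNat "") "Changelist:") = true) :=
          hany.mpr hne
        have hlen : 1 ≤ (pvFil lines L).length := List.length_pos_of_ne_nil hne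
        simp only [pvScanB, hp', if_true, this, hfil, hp]
        rw [if_pos (by simp; omega)]
        simp
    · have hp' : PySem.Str.startswith (lines.getD (L + 1) "") "Changelist:" = false := by
        simpa [pvPred] using hp
      simp only [pvScanB, hp', Bool.false_eq_true, if_false, hfil, hp]
      simpa using ih

lemma a_starts (lines : List String) :
    (PySem.List.enumerate lines 0).foldl
      (fun acc p =>
        if PySem.Str.startswith p.2 "Changelist:" && decide (0 < p.1) then acc ++ [p.1] else acc)
      [] =
    ((List.range lines.length).filter (fun j => decide (0 < j) && pvPred lines j)).map
      Int.ofNat := by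
  conv_lhs => rw [PySem.List.enumerate_eq_map_pyRange lines "", PySem.List.foldl_append_if,
    List.nil_append, List.filter_map, List.map_map, PySem.List.pyRange_one,
    List.filter_map, List.map_map]
  simp [Function.comp_def, pvPred, PySem.List.pyGetD_natCast, Bool.and_comm,
    List.getD_eq_getElem?_getD]

-- ===== VERDICT (by name: the statement is the Claim_ definition above) =====
theorem find_last_snapshot_start_spec : Claim_equal_find_last_snapshot_start := by
  intro lines _
  unfold Spec_find_last_snapshot_start find_last_snapshot_start find_last_snapshot_start_alt
  rw [a_starts, pvScanB_eq]
  rcases Nat.eq_zero_or_pos lines.length with h0 | hpos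
  · have hl : lines = [] := List.eq_nil_of_length_eq_zero h0
    subst hl
    simp [pvFil, List.range_succ, List.filter]
  · have hfa : pvFil lines (lines.length - 1) =
        (List.range lines.length).filter (fun j => decide (0 < j) && pvPred lines j) := by
      unfold pvFil
      have h : lines.length - 1 + 1 = lines.length := by omega
      rw [h]
    rw [hfa]
    set K := (List.range lines.length).filter (fun j => decide (0 < j) && pvPred lines j) with hK
    simp only [List.length_map]
    split_ifs with h1 h2
    · have hne : K ≠ [] := by
        intro h; rw [h] at h1; simp at h1
      obtain ⟨x, hx⟩ := List.getLast?_isSome.mpr hne |> Option.isSome_iff_exists.mp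
      rw [PySem.List.pyGet?_neg_one, List.getLast?_map, hx, List.getLastD_eq_getLast?, hx]
      rfl
    · omega
    · omega
    · rfl
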